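-- pv_equiv track=rewrite | github.com/gerliron18/67101-Introduction-to-Computer-Science | Ex4/hangman.py | check_the_word
-- ===== SOURCE A (Python) =====
-- def check_the_word(one_word, pattern, wrong_guess_list):
--     """A function that checks if any word from the words list is
--     suitable to the definitions, will return boolean True or False"""
--     if len(one_word) != len(pattern):  # Check if the length of the
--         #  given word is at the length of the pattern
--         return False
--     for i in range(len(one_word)):  # A loop that helps
--         # check any of the indexes of the given word
--         if pattern[i] != '_' and one_word[i] != pattern[i]:  # Check if
--             #  that index from the pattern is an underline
--             #  and if is the same at the given word
--             return False
--         elif pattern[i] == one_word[i]:  # Check if the index from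
--             #  the pattern is identical to the index from the word
--             if letter_counter(one_word, one_word[i]) != \
--                     letter_counter(pattern, one_word[i]):  # Calling another
--                 #  function, will check if a letter from the pattern will
--                 #  not appear at the wrong index at the given word
--                 return False
--         elif one_word[i] in wrong_guess_list:  # Check if the given
--             #  word got any letter from the wrong guess list
--             return False
--     return True
--
-- def letter_counter(check_word, check_letter):
--     """A function that count how many times the given
--     letter appears in the filtered word, help to check if a given word
--     is appropriate to be a hint"""
--     counter = 0  # Define a counter
--     for i in check_word:  # A loop that will go trough any
--         #  of the letters from the given word
--         if check_letter == i:  # Check if a letter from the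
--             # word is identical to a given letter
--             counter += 1  # Counter add 1
--     return counter
-- ===== SOURCE B (Python) =====
-- def check_the_word(one_word, pattern, wrong_guess_list):
--     """Two-pass check: structural scan collecting matched letters, then a
--     single frequency-table comparison over the distinct matched letters."""
--     if len(one_word) != len(pattern):
--         return False
--     matched = set()
--     order = []  # insertion order of matched letters
--     for w, p in zip(one_word, pattern):
--         if p != '_' and w != p:
--             return False
--         if w == p:
--             if w not in matched:
--                 matched.add(w)
--                 order.append(w)
--         elif w in wrong_guess_list:
--             return False
--     fw = _freq(one_word)
--     fp = _freq(pattern)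
--     return all(fw.get(c, 0) == fp.get(c, 0) for c in order)
--
--
-- def _freq(s):
--     d = {}
--     for ch in s:
--         d[ch] = d.get(ch, 0) + 1
--     return d
-- ===== Notes on version B (the rewrite author's own statement) =====
-- stated objective: faster
-- what changed: B collects the set of matched letters in one pass and compares two frequency tables built once, instead of A's per-index rescans of both strings via letter_counter.
import Mathlib
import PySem

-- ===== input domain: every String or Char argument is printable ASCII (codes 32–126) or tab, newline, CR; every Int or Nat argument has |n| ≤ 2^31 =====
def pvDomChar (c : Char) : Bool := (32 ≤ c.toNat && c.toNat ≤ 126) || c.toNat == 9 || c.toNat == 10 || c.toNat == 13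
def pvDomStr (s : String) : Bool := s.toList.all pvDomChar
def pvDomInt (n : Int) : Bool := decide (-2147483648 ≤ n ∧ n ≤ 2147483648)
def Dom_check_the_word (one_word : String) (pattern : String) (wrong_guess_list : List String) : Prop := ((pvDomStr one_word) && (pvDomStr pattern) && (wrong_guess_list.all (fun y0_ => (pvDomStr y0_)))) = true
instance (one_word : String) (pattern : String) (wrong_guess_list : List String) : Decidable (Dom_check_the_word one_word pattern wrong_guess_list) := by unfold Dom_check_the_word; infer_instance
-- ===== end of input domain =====

-- B replaces A's per-index letter_counter rescans by one matched-letter set plus two frequency tables built once (faster: O(n) vs O(n^2)).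

-- ===== PORT A =====
def letter_counter (check_word : String) (check_letter : Char) : Int :=
  check_word.toList.foldl (fun counter i => if check_letter == i then counter + 1 else counter) 0

def checkLoopA (one_word pattern : String) (wgl : List String) : List Char → List Char → Bool
  | w :: ws, p :: ps =>
    if p ≠ '_' ∧ w ≠ p then false
    else if p = w then
      if letter_counter one_word w ≠ letter_counter pattern w then false
      else checkLoopA one_word pattern wgl ws ps
    else if (String.ofList [w]) ∈ wgl then false
    else checkLoopA one_word pattern wgl ws ps
  | _, _ => true

def check_the_word (one_word : String) (pattern : String) (wrong_guess_list : List String) : Bool :=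
  if one_word.length ≠ pattern.length then false
  else checkLoopA one_word pattern wrong_guess_list one_word.toList pattern.toList

-- ===== PORT B =====
-- first pass of Source B: branch checks plus the matched-letter set (PySem.Set.add = the "if not in: append" bookkeeping)
def altLoop (wgl : List String) : List Char → List Char → PySem.Set Char → Option (PySem.Set Char)
  | w :: ws, p :: ps, m =>
    if p ≠ '_' ∧ w ≠ p then none
    else if w = p then altLoop wgl ws ps (PySem.Set.add m w)
    else if (String.ofList [w]) ∈ wgl then none
    else altLoop wgl ws ps m
  | _, _, m => some m

-- Source B's _freq: d[ch] = d.get(ch, 0) + 1 over the string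
def freq (s : String) : PySem.Dict Char Int :=
  s.toList.foldl (fun d ch => d.modify ch 0 (· + 1)) PySem.Dict.empty

def check_the_word_alt (one_word : String) (pattern : String) (wrong_guess_list : List String) : Bool :=
  if one_word.length ≠ pattern.length then false
  else
    match altLoop wrong_guess_list one_word.toList pattern.toList PySem.Set.empty with
    | none => false
    | some m =>
        m.all (fun c => (freq one_word).getD c 0 == (freq pattern).getD c 0)

-- ===== PRECONDITION & SPEC =====
def Spec_check_the_word (one_word : String) (pattern : String) (wrong_guess_list : List String) (out : Bool) : Prop := out = check_the_word_alt one_word pattern wrong_guess_list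
instance (one_word : String) (pattern : String) (wrong_guess_list : List String) (out : Bool) : Decidable (Spec_check_the_word one_word pattern wrong_guess_list out) := by unfold Spec_check_the_word; infer_instance

-- ===== CLAIM (what is proved, stated in full; the proofs are below) =====
def Claim_equal_check_the_word : Prop := ∀ (one_word : String) (pattern : String) (wrong_guess_list : List String), Dom_check_the_word one_word pattern wrong_guess_list → Spec_check_the_word one_word pattern wrong_guess_list (check_the_word one_word pattern wrong_guess_list)

-- ===== LEMMAS AND PROOFS =====

lemma freq_getD (s : String) (c : Char) : (freq s).getD c 0 = (s.toList.count c : Int) := by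
  rw [freq, ← PySem.Dict.counter_eq_foldl, PySem.Dict.getD_counter]

lemma letter_counter_eq (s : String) (c : Char) :
    letter_counter s c = (s.toList.count c : Int) := by
  have hswap : ∀ i : Char, (c == i) = (i == c) := by
    intro i; simp [eq_comm]
  rw [letter_counter]
  simp only [hswap]
  rw [PySem.List.foldl_beq_add_one]
  ring

lemma altLoop_mono (wgl : List String) :
    ∀ ws ps (m m' : PySem.Set Char), altLoop wgl ws ps m = some m' →
      ∀ c ∈ m, c ∈ m' := by
  intro ws
  induction ws with
  | nil => intro ps m m' h; cases ps <;> simp [altLoop] at h <;> simp [h]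
  | cons w ws ih =>
    intro ps m m' h c hc
    cases ps with
    | nil => simp [altLoop] at h; simp [← h, hc]
    | cons p ps =>
      simp only [altLoop] at h
      split_ifs at h with h1 h2 h3
      · exact ih ps _ m' h c ((PySem.Set.mem_add m w c).mpr (Or.inl hc))
      · exact ih ps m m' h c hc

lemma loop_eq (ow pat : String) (wgl : List String) :
    ∀ ws ps (m : PySem.Set Char),
      (∀ c ∈ m, letter_counter ow c = letter_counter pat c) →
      checkLoopA ow pat wgl ws ps =
        (match altLoop wgl ws ps m with
          | none => false
          | some m' => m'.all (fun c => (freq ow).getD c 0 == (freq pat).getD c 0)) := by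
  intro ws
  induction ws with
  | nil =>
    intro ps m hm
    cases ps <;>
      · simp only [checkLoopA, altLoop]
        symm
        simp only [List.all_eq_true, beq_iff_eq, freq_getD]
        intro c hc
        have := hm c hc
        simpa only [letter_counter_eq] using this
  | cons w ws ih =>
    intro ps m hm
    cases ps with
    | nil =>
      simp only [checkLoopA, altLoop]
      symm
      simp only [List.all_eq_true, beq_iff_eq, freq_getD]
      intro c hc
      have := hm c hc
      simpa only [letter_counter_eq] using this
    | cons p ps =>
      by_cases h1 : p ≠ '_' ∧ w ≠ p
      · simp only [checkLoopA, altLoop, if_pos h1]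
      · rcases eq_or_ne w p with rfl | hne
        · -- matched position: pattern char equals word char
          by_cases h3 : letter_counter ow w ≠ letter_counter pat w
          · cases hrec : altLoop wgl ws ps (PySem.Set.add m w) with
            | none => simp [checkLoopA, altLoop, h3, hrec]
            | some m' =>
              have hwm : w ∈ m' := altLoop_mono wgl ws ps _ m' hrec w
                ((PySem.Set.mem_add m w w).mpr (Or.inr rfl))
              have hne' : ¬ ((freq ow).getD w 0 = (freq pat).getD w 0) := by
                simp only [freq_getD, Int.natCast_inj]
                intro hcnt
                exact h3 (by simp only [letter_counter_eq, hcnt])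
              simp [checkLoopA, altLoop, h3, hrec, List.all_eq_false]
              exact ⟨w, hwm, hne'⟩
          · simp only [checkLoopA, altLoop, if_neg h1, if_neg h3]
            apply ih
            intro c hc
            rcases (PySem.Set.mem_add m w c).mp hc with hc | hc
            · exact hm c hc
            · subst hc; exact not_not.mp h3
        · -- unmatched position (and branch A passed)
          have hpw : ¬ p = w := fun h => hne h.symm
          by_cases h4 : (String.ofList [w]) ∈ wgl
          · simp [checkLoopA, altLoop, hpw, hne, h4]
          · simp only [checkLoopA, altLoop, if_neg h1, if_neg hpw, if_neg hne, if_neg h4]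
            exact ih ps m hm

-- ===== VERDICT (by name: the statement is the Claim_ definition above) =====
theorem check_the_word_spec : Claim_equal_check_the_word := by
  intro ow pat wgl _
  unfold Spec_check_the_word check_the_word check_the_word_alt
  by_cases hlen : ow.length ≠ pat.length
  · simp [hlen]
  · simp only [hlen, if_false]
    exact loop_eq ow pat wgl ow.toList pat.toList PySem.Set.empty (by intro c hc; cases hc)
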